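-- pv_equiv track=rewrite | github.com/avin0160/context-aware-doc-generator | comprehensive_docs_old.py | determine_architecture_pattern
-- ===== SOURCE A (Python) =====
-- from typing import Dict, List, Tuple, Any
--
-- def determine_architecture_pattern(analysis: Dict) -> str:
--     """Determine the primary architecture pattern"""
--     classes = analysis.get('classes', [])
--     if any('manager' in cls['name'].lower() for cls in classes):
--         return "Manager Pattern with Centralized Control"
--     elif any('factory' in cls['name'].lower() for cls in classes):
--         return "Factory Pattern Implementation"
--     else:
--         return "Object-Oriented Modular Design"
-- ===== SOURCE B (Python) =====
-- _PATTERNS = ["Object-Oriented Modular Design",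
--              "Factory Pattern Implementation",
--              "Manager Pattern with Centralized Control"]
--
-- def _score(name_lower):
--     if 'manager' in name_lower:
--         return 2
--     if 'factory' in name_lower:
--         return 1
--     return 0
--
-- def determine_architecture_pattern(analysis):
--     """Single max-fold over class names: keep the highest-ranked pattern seen."""
--     rank = 0
--     for cls in analysis.get('classes', []):
--         rank = max(rank, _score(cls['name'].lower()))
--     return _PATTERNS[rank]
-- ===== Notes on version B (the rewrite author's own statement) =====
-- stated objective: alternative
-- what changed: Replaces A's two sequential short-circuiting any() scans by one max-fold that maps each class name to a numeric rank (manager=2, factory=1, else 0) and indexes a pattern table with the maximum rank.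
import Mathlib
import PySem

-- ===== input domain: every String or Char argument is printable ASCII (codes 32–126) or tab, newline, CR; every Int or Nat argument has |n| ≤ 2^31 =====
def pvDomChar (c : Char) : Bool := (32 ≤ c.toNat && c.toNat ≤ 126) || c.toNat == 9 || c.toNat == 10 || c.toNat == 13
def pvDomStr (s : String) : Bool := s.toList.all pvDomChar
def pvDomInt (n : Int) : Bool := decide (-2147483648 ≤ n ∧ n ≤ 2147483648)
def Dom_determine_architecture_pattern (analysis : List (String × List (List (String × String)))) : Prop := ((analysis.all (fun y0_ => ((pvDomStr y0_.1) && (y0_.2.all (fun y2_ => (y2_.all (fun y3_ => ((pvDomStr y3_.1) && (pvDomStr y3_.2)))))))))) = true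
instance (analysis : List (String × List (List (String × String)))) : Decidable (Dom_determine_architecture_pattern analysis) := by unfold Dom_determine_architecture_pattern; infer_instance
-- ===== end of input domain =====

-- B replaces A's two sequential any() scans by a single max-fold over numeric ranks
-- indexed into a pattern table (objective: alternative; same O(n) cost).

-- ===== PORT A =====
-- cls['name'] raises KeyError when absent; Pre_ guarantees the key exists, so .getD "" is exact there.
def determine_architecture_pattern (analysis : List (String × List (List (String × String)))) : String :=
  let classes := PySem.Dict.getD (PySem.Dict.mk analysis) "classes" []
  if classes.any (fun cls => PySem.Str.isIn "manager" (PySem.Str.lower ((PySem.Dict.get? (PySem.Dict.mk cls) "name").getD ""))) then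
    "Manager Pattern with Centralized Control"
  else if classes.any (fun cls => PySem.Str.isIn "factory" (PySem.Str.lower ((PySem.Dict.get? (PySem.Dict.mk cls) "name").getD ""))) then
    "Factory Pattern Implementation"
  else
    "Object-Oriented Modular Design"

-- ===== PORT B =====
def pvPatterns : List String :=
  ["Object-Oriented Modular Design",
   "Factory Pattern Implementation",
   "Manager Pattern with Centralized Control"]

def pvScore (nameLower : String) : Int :=
  if PySem.Str.isIn "manager" nameLower then 2
  else if PySem.Str.isIn "factory" nameLower then 1
  else 0

-- cls['name'] as under Pre_; _PATTERNS[rank] with rank always in [0,2], so .getD "" is exact.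
def determine_architecture_pattern_alt (analysis : List (String × List (List (String × String)))) : String :=
  let rank := (PySem.Dict.getD (PySem.Dict.mk analysis) "classes" []).foldl
    (fun r cls => max r (pvScore (PySem.Str.lower ((PySem.Dict.get? (PySem.Dict.mk cls) "name").getD "")))) 0
  (PySem.List.pyGet? pvPatterns rank).getD ""

-- ===== PRECONDITION & SPEC =====
-- Pre_ excludes inputs where some class dict lacks a 'name' key: B (reading every name once)
-- raises KeyError there, while A may still return if an earlier class already matched 'manager'.
def Pre_determine_architecture_pattern (analysis : List (String × List (List (String × String)))) : Prop :=
  ((PySem.Dict.getD (PySem.Dict.mk analysis) "classes" []).all (fun cls => (PySem.Dict.get? (PySem.Dict.mk cls) "name").isSome)) = true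
instance (analysis : List (String × List (List (String × String)))) : Decidable (Pre_determine_architecture_pattern analysis) := by unfold Pre_determine_architecture_pattern; infer_instance

def pvWitness_determine_architecture_pattern : (List (String × List (List (String × String)))) :=
  [("classes", [[("name", "DocManager")], [("name", "WidgetFactory")]])]

def Spec_determine_architecture_pattern (analysis : List (String × List (List (String × String)))) (out : String) : Prop := out = determine_architecture_pattern_alt analysis
instance (analysis : List (String × List (List (String × String)))) (out : String) : Decidable (Spec_determine_architecture_pattern analysis out) := by unfold Spec_determine_architecture_pattern; infer_instance

-- ===== CLAIM (what is proved, stated in full; the proofs are below) =====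
def Claim_equal_determine_architecture_pattern : Prop := ∀ (analysis : List (String × List (List (String × String)))), Dom_determine_architecture_pattern analysis → Pre_determine_architecture_pattern analysis → Spec_determine_architecture_pattern analysis (determine_architecture_pattern analysis)

-- ===== LEMMAS AND PROOFS =====

def pvName (cls : List (String × String)) : String :=
  PySem.Str.lower ((PySem.Dict.get? (PySem.Dict.mk cls) "name").getD "")

def pvHasM (cls : List (String × String)) : Bool := PySem.Str.isIn "manager" (pvName cls)
def pvHasF (cls : List (String × String)) : Bool := PySem.Str.isIn "factory" (pvName cls)

theorem pvFold_eq (l : List (List (String × String))) : ∀ (r : Int), 0 ≤ r →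
    l.foldl (fun r cls => max r (pvScore (pvName cls))) r
      = max r (if l.any pvHasM then 2 else if l.any pvHasF then 1 else 0) := by
  induction l with
  | nil => intro r hr; simp; omega
  | cons c l ih =>
    intro r hr
    have hs : pvScore (pvName c) = if pvHasM c then 2 else if pvHasF c then 1 else 0 := rfl
    simp only [List.foldl_cons, List.any_cons]
    rw [ih (max r (pvScore (pvName c))) (by rw [hs]; split_ifs <;> omega), hs]
    rcases Bool.eq_false_or_eq_true (pvHasM c) with hM | hM <;>
      rcases Bool.eq_false_or_eq_true (pvHasF c) with hF | hF <;>
        rcases Bool.eq_false_or_eq_true (l.any pvHasM) with hA | hA <;>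
          rcases Bool.eq_false_or_eq_true (l.any pvHasF) with hB | hB <;>
            simp only [hM, hF, hA, hB, Bool.true_or, Bool.false_or, if_true, if_false,
              Bool.false_eq_true] <;> omega

theorem determine_architecture_pattern_spec : Claim_equal_determine_architecture_pattern := by
  intro analysis _ _
  unfold Spec_determine_architecture_pattern determine_architecture_pattern determine_architecture_pattern_alt
  have e1 : (fun cls => PySem.Str.isIn "manager" (PySem.Str.lower ((PySem.Dict.get? (PySem.Dict.mk cls) "name").getD ""))) = pvHasM := rfl
  have e2 : (fun cls => PySem.Str.isIn "factory" (PySem.Str.lower ((PySem.Dict.get? (PySem.Dict.mk cls) "name").getD ""))) = pvHasF := rfl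
  have e3 : (fun (r : Int) cls => max r (pvScore (PySem.Str.lower ((PySem.Dict.get? (PySem.Dict.mk cls) "name").getD "")))) = (fun r cls => max r (pvScore (pvName cls))) := rfl
  simp only [e1, e2, e3]
  rw [pvFold_eq _ 0 le_rfl]
  rcases Bool.eq_false_or_eq_true ((PySem.Dict.getD (PySem.Dict.mk analysis) "classes" []).any pvHasM) with hM | hM <;>
    rcases Bool.eq_false_or_eq_true ((PySem.Dict.getD (PySem.Dict.mk analysis) "classes" []).any pvHasF) with hF | hF <;>
      simp only [hM, hF, if_true, if_false, Bool.false_eq_true] <;> decide
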